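-- pv_equiv track=rewrite | github.com/SofiiaHembara/Research--AI-RESEARCH | Week2/optimized_code_СhatGpt.py | rescue_people
-- ===== SOURCE A (Python) =====
-- def rescue_people(smarties, limit_iq):
--     """
--     Returns a number of trips and lists of persons in one trip.
--     """
--     if not smarties:
--         return (0, [])
--
--     # Sort smarties by IQ in descending order
--     sorted_smarties = sorted(smarties.items(), key=lambda x: (-x[1], x[0]))
--
--     trips = []
--     remaining_people = set(sorted_smarties)
--
--     while remaining_people:
--         trip, total_iq = [], 0
--         for name, iq in sorted_smarties:
--             if (name, iq) in remaining_people and total_iq + iq <= limit_iq: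
--                 trip.append(name)
--                 total_iq += iq
--                 remaining_people.remove((name, iq))
--         if trip:
--             trips.append(trip)
--         else:
--             break
--
--     return len(trips), trips
-- ===== SOURCE B (Python) =====
-- def rescue_people(smarties, limit_iq):
--     """
--     Returns a number of trips and lists of persons in one trip.
--     """
--     if not smarties:
--         return (0, [])
--     order = sorted(smarties.items(), key=lambda x: (-x[1], x[0]))
--     bins = []  # per open trip: [names, total_iq]
--     for name, iq in order:
--         for b in bins:
--             if b[1] + iq <= limit_iq:
--                 b[0].append(name)
--                 b[1] += iq
--                 break
--         else:
--             if iq <= limit_iq: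
--                 bins.append([[name], iq])
--     trips = [b[0] for b in bins]
--     return len(trips), trips
-- ===== Notes on version B (the rewrite author's own statement) =====
-- stated objective: alternative
-- what changed: A repeatedly rescans the whole sorted list (one full pass plus set bookkeeping per trip) to fill trips one at a time; B makes a single forward pass over the sorted people, first-fit placing each person into the earliest open trip that still has room (opening a new trip when none fits and the person fits alone), which yields exactly the same trips.
import Mathlib
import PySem

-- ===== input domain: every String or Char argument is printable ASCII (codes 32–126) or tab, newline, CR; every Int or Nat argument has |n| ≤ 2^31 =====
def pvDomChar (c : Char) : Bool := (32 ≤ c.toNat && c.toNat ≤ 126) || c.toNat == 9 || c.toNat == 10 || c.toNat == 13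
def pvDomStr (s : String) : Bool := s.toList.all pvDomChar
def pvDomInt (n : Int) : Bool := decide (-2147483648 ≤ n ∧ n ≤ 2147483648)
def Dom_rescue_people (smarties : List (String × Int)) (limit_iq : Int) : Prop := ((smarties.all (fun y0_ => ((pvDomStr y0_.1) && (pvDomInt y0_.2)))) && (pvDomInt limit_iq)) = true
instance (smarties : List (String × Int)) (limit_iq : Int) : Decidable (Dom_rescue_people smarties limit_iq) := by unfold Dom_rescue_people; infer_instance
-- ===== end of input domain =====

-- B replaces A's per-trip full rescan of the sorted list (with set bookkeeping) by a single
-- first-fit pass over the sorted people that yields the same trips (alternative algorithm).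


-- ===== PORT A =====
-- the inner 'for name, iq in sorted_smarties' pass: state (trip, total_iq, remaining_people)
def passA (limit : Int) : List (String × Int) → List String → Int → PySem.Set (String × Int) → List String × PySem.Set (String × Int)
  | [], trip, _, rem => (trip, rem)
  | (name, iq) :: rest, trip, tot, rem =>
    if (name, iq) ∈ rem ∧ tot + iq ≤ limit then
      passA limit rest (trip ++ [name]) (tot + iq) (PySem.Set.discard rem (name, iq))
    else
      passA limit rest trip tot rem

-- termination facts for the while-loop below (cited by loopA's decreasing_by)
theorem passA_snd_length_le (limit : Int) : ∀ (xs : List (String × Int)) (trip : List String) (tot : Int) (rem : PySem.Set (String × Int)),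
    (passA limit xs trip tot rem).2.length ≤ rem.length := by
  intro xs
  induction xs with
  | nil => intro trip tot rem; simp [passA]
  | cons p rest ih =>
    intro trip tot rem
    obtain ⟨name, iq⟩ := p
    by_cases h : (name, iq) ∈ rem ∧ tot + iq ≤ limit
    · simp only [passA, if_pos h]
      refine le_trans (ih _ _ _) ?_
      have hd : PySem.Set.discard rem (name, iq) = rem.filter (fun y => y != (name, iq)) := rfl
      rw [hd]; exact List.length_filter_le _ _
    · simp only [passA, if_neg h]; exact ih _ _ _

theorem passA_progress (limit : Int) : ∀ (xs : List (String × Int)) (trip : List String) (tot : Int) (rem : PySem.Set (String × Int)),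
    (passA limit xs trip tot rem).1 = trip ∨ (passA limit xs trip tot rem).2.length < rem.length := by
  intro xs
  induction xs with
  | nil => intro trip tot rem; left; simp [passA]
  | cons p rest ih =>
    intro trip tot rem
    obtain ⟨name, iq⟩ := p
    by_cases h : (name, iq) ∈ rem ∧ tot + iq ≤ limit
    · right
      simp only [passA, if_pos h]
      have hd : PySem.Set.discard rem (name, iq) = rem.filter (fun y => y != (name, iq)) := rfl
      calc (passA limit rest (trip ++ [name]) (tot + iq) (PySem.Set.discard rem (name, iq))).2.length
          ≤ (PySem.Set.discard rem (name, iq)).length := passA_snd_length_le limit _ _ _ _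
        _ < rem.length := by
            rw [hd]
            exact List.length_filter_lt_length_iff_exists.mpr ⟨(name, iq), h.1, by simp⟩
    · simp only [passA, if_neg h]; exact ih _ _ _

-- the 'while remaining_people:' loop
def loopA (limit : Int) (sortedS : List (String × Int)) (trips : List (List String)) (rem : PySem.Set (String × Int)) : List (List String) :=
  if rem = [] then trips
  else
    let r := passA limit sortedS [] 0 rem
    if h : r.1 = [] then trips
    else loopA limit sortedS (trips ++ [r.1]) r.2
termination_by rem.length
decreasing_by
  rcases passA_progress limit sortedS [] 0 rem with h1 | h1
  · exact absurd h1 h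
  · exact h1

def rescue_people (smarties : List (String × Int)) (limit_iq : Int) : Int × List (List String) :=
  if smarties = [] then (0, [])
  else
    let sorted_smarties := PySem.List.sorted2 (PySem.Dict.ofList smarties).items (fun x => -x.2) (fun x => x.1)
    let trips := loopA limit_iq sorted_smarties [] (PySem.Set.ofList sorted_smarties)
    (PySem.List.len trips, trips)

-- ===== PORT B =====
-- place one person into the first open trip with room; open a new trip if none and they fit alone
def placeB (limit : Int) (name : String) (iq : Int) : List (List String × Int) → List (List String × Int)
  | [] => if iq ≤ limit then [([name], iq)] else []
  | (t, s) :: bs => if s + iq ≤ limit then (t ++ [name], s + iq) :: bs else (t, s) :: placeB limit name iq bs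

def rescue_people_alt (smarties : List (String × Int)) (limit_iq : Int) : Int × List (List String) :=
  if smarties = [] then (0, [])
  else
    let order := PySem.List.sorted2 (PySem.Dict.ofList smarties).items (fun x => -x.2) (fun x => x.1)
    let bins := order.foldl (fun bs p => placeB limit_iq p.1 p.2 bs) []
    let trips := bins.map Prod.fst
    (PySem.List.len trips, trips)

-- ===== PRECONDITION & SPEC =====
def Spec_rescue_people (smarties : List (String × Int)) (limit_iq : Int) (out : Int × List (List String)) : Prop := out = rescue_people_alt smarties limit_iq
instance (smarties : List (String × Int)) (limit_iq : Int) (out : Int × List (List String)) : Decidable (Spec_rescue_people smarties limit_iq out) := by unfold Spec_rescue_people; infer_instance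

-- ===== CLAIM (what is proved, stated in full; the proofs are below) =====
def Claim_equal_rescue_people : Prop := ∀ (smarties : List (String × Int)) (limit_iq : Int), Dom_rescue_people smarties limit_iq → Spec_rescue_people smarties limit_iq (rescue_people smarties limit_iq)

-- ===== LEMMAS AND PROOFS =====

-- one abstract pass at starting load `tot` over the not-yet-rescued people, in order:
-- returns (people taken, final load, people left); the bridge between the two programs
def pass1 (limit : Int) (tot : Int) : List (String × Int) → List (String × Int) × Int × List (String × Int)
  | [] => ([], tot, [])
  | p :: xs =>
    if tot + p.2 ≤ limit then
      let r := pass1 limit (tot + p.2) xs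
      (p :: r.1, r.2.1, r.2.2)
    else
      let r := pass1 limit tot xs
      (r.1, r.2.1, p :: r.2.2)

theorem pass1_lengths (limit : Int) : ∀ (xs : List (String × Int)) (tot : Int),
    (pass1 limit tot xs).1.length + (pass1 limit tot xs).2.2.length = xs.length := by
  intro xs
  induction xs with
  | nil => intro tot; simp [pass1]
  | cons p rest ih =>
    intro tot
    by_cases h : tot + p.2 ≤ limit
    · have := ih (tot + p.2); simp only [pass1, if_pos h]; simp; omega
    · have := ih tot; simp only [pass1, if_neg h]; simp; omega

theorem pass1_taken_sublist (limit : Int) : ∀ (xs : List (String × Int)) (tot : Int),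
    (pass1 limit tot xs).1.Sublist xs := by
  intro xs
  induction xs with
  | nil => intro tot; simp [pass1]
  | cons p rest ih =>
    intro tot
    by_cases h : tot + p.2 ≤ limit
    · simpa [pass1, h] using (ih (tot + p.2)).cons₂ p
    · simpa [pass1, h] using (ih tot).cons p

-- the iterated passes (what the while loop produces)
def iterB (limit : Int) (r : List (String × Int)) : List (List String) :=
  let p := pass1 limit 0 r
  if h : p.1 = [] then []
  else p.1.map Prod.fst :: iterB limit p.2.2
termination_by r.length
decreasing_by
  have hl := pass1_lengths limit r 0
  have : (pass1 limit 0 r).1.length ≠ 0 := by simpa using h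
  omega

theorem pass1_filter_rest (limit : Int) : ∀ (xs : List (String × Int)) (tot : Int), xs.Nodup →
    xs.filter (fun p => decide (p ∉ (pass1 limit tot xs).1)) = (pass1 limit tot xs).2.2 := by
  intro xs
  induction xs with
  | nil => intro tot _; simp [pass1]
  | cons p rest ih =>
    intro tot hnd
    rw [List.nodup_cons] at hnd
    by_cases h : tot + p.2 ≤ limit
    · simp only [pass1, if_pos h]
      rw [List.filter_cons_of_neg (by simp)]
      refine Eq.trans (List.filter_congr ?_) (ih (tot + p.2) hnd.2)
      intro q hq
      have hne : q ≠ p := fun e => hnd.1 (e ▸ hq)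
      simp [List.mem_cons, hne]
    · simp only [pass1, if_neg h]
      have hpT : p ∉ (pass1 limit tot rest).1 :=
        fun hmem => hnd.1 ((pass1_taken_sublist limit rest tot).subset hmem)
      rw [List.filter_cons_of_pos (by simpa using hpT)]
      exact congrArg (p :: ·) (ih tot hnd.2)

theorem passA_eq_pass1 (limit : Int) : ∀ (xs : List (String × Int)), xs.Nodup →
    ∀ (trip : List String) (tot : Int) (rem : PySem.Set (String × Int)),
    passA limit xs trip tot rem =
      (trip ++ ((pass1 limit tot (xs.filter (fun p => decide (p ∈ rem)))).1).map Prod.fst,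
       rem.filter (fun p => decide (p ∉ (pass1 limit tot (xs.filter (fun p => decide (p ∈ rem)))).1))) := by
  intro xs
  induction xs with
  | nil =>
    intro _ trip tot rem
    simp [passA, pass1, List.filter_eq_self.mpr]
  | cons q rest ih =>
    obtain ⟨name, iq⟩ := q
    intro hnd trip tot rem
    rw [List.nodup_cons] at hnd
    by_cases hmem : (name, iq) ∈ rem
    · have hq : ((name, iq) :: rest).filter (fun p => decide (p ∈ rem)) = (name, iq) :: rest.filter (fun p => decide (p ∈ rem)) := by
        rw [List.filter_cons_of_pos (by simpa using hmem)]
      by_cases hfit : tot + iq ≤ limit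
      · simp only [passA, if_pos (show (name, iq) ∈ rem ∧ tot + iq ≤ limit from ⟨hmem, hfit⟩)]
        rw [ih hnd.2 (trip ++ [name]) (tot + iq) (PySem.Set.discard rem (name, iq))]
        have hd : PySem.Set.discard rem (name, iq) = rem.filter (fun y => y != (name, iq)) := rfl
        have hfilter : rest.filter (fun p => decide (p ∈ PySem.Set.discard rem (name, iq)))
            = rest.filter (fun p => decide (p ∈ rem)) := by
          refine List.filter_congr ?_
          intro p hp
          have hne : p ≠ (name, iq) := fun e => hnd.1 (e ▸ hp)
          simp [hd, List.mem_filter, hne]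
        rw [hfilter, hq]
        simp only [pass1, if_pos (show tot + ((name, iq) : String × Int).2 ≤ limit from hfit)]
        refine Prod.ext ?_ ?_
        · simp [List.append_assoc]
        · simp only []
          rw [hd, List.filter_filter]
          refine List.filter_congr ?_
          intro y hy
          by_cases hyq : y = (name, iq) <;> simp [hyq, List.mem_cons]
      · have hnot : ¬ ((name, iq) ∈ rem ∧ tot + iq ≤ limit) := by tauto
        simp only [passA, if_neg hnot]
        rw [ih hnd.2 trip tot rem, hq]
        simp only [pass1, if_neg (show ¬ tot + ((name, iq) : String × Int).2 ≤ limit from hfit)]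
    · have hnot : ¬ ((name, iq) ∈ rem ∧ tot + iq ≤ limit) := by tauto
      have hq : ((name, iq) :: rest).filter (fun p => decide (p ∈ rem)) = rest.filter (fun p => decide (p ∈ rem)) := by
        rw [List.filter_cons_of_neg (by simpa using hmem)]
      simp only [passA, if_neg hnot]
      rw [ih hnd.2 trip tot rem, hq]

theorem loopA_eq_iterB (limit : Int) (xs : List (String × Int)) (hxs : xs.Nodup) :
    ∀ (n : Nat) (rem : PySem.Set (String × Int)), rem.length ≤ n → ∀ (trips : List (List String)),
    loopA limit xs trips rem = trips ++ iterB limit (xs.filter (fun p => decide (p ∈ rem))) := by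
  intro n
  induction n with
  | zero =>
    intro rem hlen trips
    have : rem = [] := List.length_eq_zero_iff.mp (Nat.le_zero.mp hlen)
    subst this
    rw [loopA]
    simp [iterB, pass1]
  | succ n ih =>
    intro rem hlen trips
    by_cases hrem : rem = []
    · subst hrem
      rw [loopA]
      simp [iterB, pass1]
    · rw [loopA]
      simp only [if_neg hrem]
      have hpa := passA_eq_pass1 limit xs hxs [] 0 rem
      simp only [hpa, List.nil_append]
      by_cases hT : (pass1 limit 0 (xs.filter (fun p => decide (p ∈ rem)))).1 = []
      · rw [dif_pos (by simp [hT])]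
        rw [iterB]
        simp [hT]
      · rw [dif_neg (by simp [hT])]
        have hsub : (pass1 limit 0 (xs.filter (fun p => decide (p ∈ rem)))).1.Sublist
            (xs.filter (fun p => decide (p ∈ rem))) := pass1_taken_sublist limit _ 0
        obtain ⟨q, hqT⟩ := List.exists_mem_of_ne_nil _ hT
        have hqrem : q ∈ rem := by
          have := hsub.subset hqT
          simpa using (List.mem_filter.mp this).2
        have hlt : (rem.filter (fun p => decide (p ∉ (pass1 limit 0 (xs.filter (fun p => decide (p ∈ rem)))).1))).length < rem.length :=
          List.length_filter_lt_length_iff_exists.mpr ⟨q, hqrem, by simp [hqT]⟩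
        rw [ih _ (by omega) _]
        have hfeq : xs.filter (fun p => decide (p ∈ rem.filter (fun p => decide (p ∉ (pass1 limit 0 (xs.filter (fun p => decide (p ∈ rem)))).1))))
            = (pass1 limit 0 (xs.filter (fun p => decide (p ∈ rem)))).2.2 := by
          rw [← pass1_filter_rest limit _ 0 (hxs.filter _)]
          have hsplit : xs.filter (fun p => decide (p ∈ rem.filter (fun p => decide (p ∉ (pass1 limit 0 (xs.filter (fun p => decide (p ∈ rem)))).1))))
              = (xs.filter (fun p => decide (p ∈ rem))).filter (fun p => decide (p ∉ (pass1 limit 0 (xs.filter (fun p => decide (p ∈ rem)))).1)) := by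
            rw [List.filter_filter]
            refine List.filter_congr ?_
            intro p hp
            simp [List.mem_filter, Bool.and_comm]
          exact hsplit
        rw [hfeq]
        conv_rhs => rw [iterB]
        rw [dif_neg hT]
        simp

theorem foldl_place_cons (limit : Int) : ∀ (xs : List (String × Int)) (t : List String) (s : Int) (bs : List (List String × Int)),
    xs.foldl (fun bs p => placeB limit p.1 p.2 bs) ((t, s) :: bs) =
      (t ++ ((pass1 limit s xs).1).map Prod.fst, (pass1 limit s xs).2.1) ::
        ((pass1 limit s xs).2.2).foldl (fun bs p => placeB limit p.1 p.2 bs) bs := by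
  intro xs
  induction xs with
  | nil => intro t s bs; simp [pass1]
  | cons p rest ih =>
    intro t s bs
    by_cases h : s + p.2 ≤ limit
    · have hstep : placeB limit p.1 p.2 ((t, s) :: bs) = (t ++ [p.1], s + p.2) :: bs := by
        simp [placeB, h]
      simp only [List.foldl_cons, hstep, ih]
      simp only [pass1, if_pos h]
      simp [List.append_assoc]
    · have hstep : placeB limit p.1 p.2 ((t, s) :: bs) = (t, s) :: placeB limit p.1 p.2 bs := by
        simp [placeB, h]
      simp only [List.foldl_cons, hstep, ih]
      simp only [pass1, if_neg h]
      simp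

theorem iterB_cons_big (limit : Int) : ∀ (n : Nat) (r : List (String × Int)), r.length ≤ n →
    ∀ (p : String × Int), ¬ p.2 ≤ limit → iterB limit (p :: r) = iterB limit r := by
  intro n
  induction n with
  | zero =>
    intro r hlen p hp
    have : r = [] := List.length_eq_zero_iff.mp (Nat.le_zero.mp hlen)
    subst this
    have hnil : iterB limit [] = [] := by rw [iterB]; simp [pass1]
    conv_lhs => rw [iterB]
    simp [pass1, hp, hnil]
  | succ n ih =>
    intro r hlen p hp
    have h0 : ¬ ((0 : Int) + p.2 ≤ limit) := by omega
    have hps : pass1 limit 0 (p :: r) = ((pass1 limit 0 r).1, (pass1 limit 0 r).2.1, p :: (pass1 limit 0 r).2.2) := by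
      simp [pass1, hp]
    by_cases hT : (pass1 limit 0 r).1 = []
    · rw [iterB]
      conv_rhs => rw [iterB]
      simp [hps, hT]
    · have hlens := pass1_lengths limit r 0
      have hTlen : (pass1 limit 0 r).1.length ≠ 0 := by simpa using hT
      rw [iterB]
      conv_rhs => rw [iterB]
      rw [dif_neg (by simp [hps, hT]), dif_neg (by simp [hT])]
      simp only [hps]
      rw [ih (pass1 limit 0 r).2.2 (by omega) p hp]

theorem foldl_place_nil (limit : Int) : ∀ (n : Nat) (xs : List (String × Int)), xs.length ≤ n →
    (xs.foldl (fun bs p => placeB limit p.1 p.2 bs) []).map Prod.fst = iterB limit xs := by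
  intro n
  induction n with
  | zero =>
    intro xs hlen
    have : xs = [] := List.length_eq_zero_iff.mp (Nat.le_zero.mp hlen)
    subst this
    rw [iterB]
    simp [pass1]
  | succ n ih =>
    intro xs hlen
    cases xs with
    | nil => rw [iterB]; simp [pass1]
    | cons p rest =>
      simp only [List.length_cons] at hlen
      by_cases hfit : p.2 ≤ limit
      · have h0 : (0 : Int) + p.2 ≤ limit := by omega
        have hstep : placeB limit p.1 p.2 [] = [([p.1], p.2)] := by simp [placeB, hfit]
        simp only [List.foldl_cons, hstep]
        rw [foldl_place_cons]
        have hlens := pass1_lengths limit rest p.2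
        have hps : pass1 limit 0 (p :: rest) = (p :: (pass1 limit p.2 rest).1, (pass1 limit p.2 rest).2.1, (pass1 limit p.2 rest).2.2) := by
          simp [pass1, hfit]
        conv_rhs => rw [iterB]
        rw [dif_neg (by simp [hps])]
        simp only [hps, List.map_cons, List.map]
        rw [← ih (pass1 limit p.2 rest).2.2 (by omega)]
        simp
      · have h0 : ¬ ((0 : Int) + p.2 ≤ limit) := by omega
        have hstep : placeB limit p.1 p.2 [] = [] := by simp [placeB, hfit]
        simp only [List.foldl_cons, hstep]
        rw [ih rest (by omega), iterB_cons_big limit rest.length rest le_rfl p hfit]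

-- ===== VERDICT (by name: the statement is the Claim_ definition above) =====
theorem rescue_people_spec : Claim_equal_rescue_people := by
  intro smarties limit_iq _
  unfold Spec_rescue_people rescue_people rescue_people_alt
  by_cases hs : smarties = []
  · simp [hs]
  · simp only [if_neg hs]
    set xs := PySem.List.sorted2 (PySem.Dict.ofList smarties).items (fun x => -x.2) (fun x => x.1) with hxs_def
    have hitems : (PySem.Dict.ofList smarties).items.Nodup := by
      have hk : ((PySem.Dict.ofList smarties).items.map (·.1)).Nodup :=
        PySem.Dict.nodup_keys_ofList (κ := String) (ν := Int) smarties
      exact hk.of_map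
    have hxs : xs.Nodup := (PySem.List.sorted2_perm ..).symm.nodup hitems
    have h1 : loopA limit_iq xs [] (PySem.Set.ofList xs) =
        (xs.foldl (fun bs p => placeB limit_iq p.1 p.2 bs) []).map Prod.fst := by
      have h2 := loopA_eq_iterB limit_iq xs hxs (PySem.Set.ofList xs).length (PySem.Set.ofList xs) le_rfl []
      rw [PySem.Set.ofList_eq_self_of_nodup xs hxs] at h2
      rw [PySem.Set.ofList_eq_self_of_nodup xs hxs, h2, List.nil_append, List.filter_eq_self.mpr (by intro a ha; simpa using ha)]
      exact (foldl_place_nil limit_iq xs.length xs le_rfl).symm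
    simp only [h1]
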